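-- pv_equiv track=rewrite | github.com/Luminarada80/elcheva_bulk_rna_analysis | hannah_pipeline/MODULE_030.ALIGN_AND_QUANTIFY/ReadStats.py | build_speed_index
-- ===== SOURCE A (Python) =====
-- def build_speed_index(blocks_by_chr, division):
--     """
--     Build a speed/anchor index to narrow binary-like searches.
--     For each chromosome, returns list of tuples:
--         (first_block_start_of_bin, start_index, end_index)
--     Handles small lists gracefully.
--     """
--     speed = {}
--     for chrom, blocks in blocks_by_chr.items():
--         # blocks are already sorted by (start, end)
--         n = len(blocks)
--         if n == 0:
--             speed[chrom] = [(0, 0, 0)]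
--             continue
--
--         # number of bins cannot exceed n; ensure at least size 1 bins
--         bins = min(division, n)
--         # compute roughly equal-sized bins
--         base = n // bins
--         rem = n % bins
--
--         index_list = []
--         start = 0
--         for i in range(bins):
--             size = base + (1 if i < rem else 0)
--             end = start + size
--             # guard (shouldn't happen if size>0)
--             if start >= n:
--                 start = n - 1
--             first_start = blocks[start][0]
--             index_list.append((first_start, start, end))
--             start = end
--
--         # just in case, ensure last bin ends at n
--         if index_list and index_list[-1][2] != n:
--             first_start = blocks[index_list[-1][1]][0]
--             index_list[-1] = (first_start, index_list[-1][1], n)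
--
--         speed[chrom] = index_list
--
--     return speed
-- ===== SOURCE B (Python) =====
-- def build_speed_index(blocks_by_chr, division):
--     """Each bin computed independently in closed form: bin i spans
--     [i*base + min(i, rem), (i+1)*base + min(i+1, rem))."""
--     speed = {}
--     for chrom, blocks in blocks_by_chr.items():
--         n = len(blocks)
--         if n == 0:
--             speed[chrom] = [(0, 0, 0)]
--             continue
--         bins = min(division, n)
--         base = n // bins
--         rem = n % bins
--         speed[chrom] = [
--             (blocks[i * base + min(i, rem)][0],
--              i * base + min(i, rem),
--              (i + 1) * base + min(i + 1, rem))
--             for i in range(bins)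
--         ]
--     return speed
-- ===== Notes on version B (the rewrite author's own statement) =====
-- stated objective: simpler
-- what changed: Each bin's start/end is computed independently by the closed form i*base+min(i,rem), replacing the running-start accumulator, the dead start>=n guard and the final end!=n fix-up.
import Mathlib
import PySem

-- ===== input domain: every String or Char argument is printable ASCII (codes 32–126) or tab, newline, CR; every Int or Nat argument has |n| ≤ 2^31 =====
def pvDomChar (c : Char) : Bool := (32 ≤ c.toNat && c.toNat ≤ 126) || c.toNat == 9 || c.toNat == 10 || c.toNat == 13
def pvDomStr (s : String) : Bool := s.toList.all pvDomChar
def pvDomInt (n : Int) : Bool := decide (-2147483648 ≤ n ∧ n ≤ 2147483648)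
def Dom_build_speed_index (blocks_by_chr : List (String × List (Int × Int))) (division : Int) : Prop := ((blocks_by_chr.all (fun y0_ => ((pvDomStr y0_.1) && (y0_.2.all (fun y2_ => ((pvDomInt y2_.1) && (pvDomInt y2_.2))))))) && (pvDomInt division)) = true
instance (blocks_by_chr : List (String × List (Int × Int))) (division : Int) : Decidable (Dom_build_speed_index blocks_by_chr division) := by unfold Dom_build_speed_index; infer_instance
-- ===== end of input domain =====

-- header: B computes each bin independently in closed form (i*base + min(i,rem)),
-- dropping A's running-start accumulator, its dead start>=n guard and its final fix-up (objective: simpler).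

-- ===== PORT A =====
-- per-chromosome body of A's loop (n == 0 case, accumulator loop over range(bins), final fix-up)
def pvIndexListA (blocks : List (Int × Int)) (division : Int) : List (Int × Int × Int) :=
  let n : Int := blocks.length
  if n = 0 then [(0, 0, 0)]
  else
    let bins := min division n
    let base := PySem.Int.floordiv n bins
    let rem := PySem.Int.mod n bins
    let p := (PySem.List.pyRange 0 bins 1).foldl
      (fun (st : List (Int × Int × Int) × Int) i =>
        let size := base + (if i < rem then 1 else 0)
        let e := st.2 + size
        let start := if st.2 ≥ n then n - 1 else st.2
        let first_start := (PySem.List.pyGetD blocks start (0, 0)).1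
        (st.1 ++ [(first_start, start, e)], e)) ([], 0)
    let il := p.1
    match il.getLast? with
    | none => il
    | some last =>
        if last.2.2 ≠ n then
          il.dropLast ++ [((PySem.List.pyGetD blocks last.2.1 (0, 0)).1, last.2.1, n)]
        else il

def build_speed_index (blocks_by_chr : List (String × List (Int × Int))) (division : Int) : List (String × List (Int × Int × Int)) :=
  (blocks_by_chr.foldl
    (fun (speed : PySem.Dict String (List (Int × Int × Int))) cb =>
      speed.insert cb.1 (pvIndexListA cb.2 division))
    PySem.Dict.empty).items

-- ===== PORT B =====
-- per-chromosome body of B's loop: one comprehension, each bin in closed form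
def pvIndexListB (blocks : List (Int × Int)) (division : Int) : List (Int × Int × Int) :=
  let n : Int := blocks.length
  if n = 0 then [(0, 0, 0)]
  else
    let bins := min division n
    let base := PySem.Int.floordiv n bins
    let rem := PySem.Int.mod n bins
    (PySem.List.pyRange 0 bins 1).map (fun i =>
      ((PySem.List.pyGetD blocks (i * base + min i rem) (0, 0)).1,
       i * base + min i rem,
       (i + 1) * base + min (i + 1) rem))

def build_speed_index_alt (blocks_by_chr : List (String × List (Int × Int))) (division : Int) : List (String × List (Int × Int × Int)) :=
  (blocks_by_chr.foldl
    (fun (speed : PySem.Dict String (List (Int × Int × Int))) cb =>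
      speed.insert cb.1 (pvIndexListB cb.2 division))
    PySem.Dict.empty).items

-- ===== PRECONDITION & SPEC =====
-- Pre_ excludes exactly division = 0 with some nonempty block list, where Python A
-- (and Python B) raise ZeroDivisionError on n // bins.
def Pre_build_speed_index (blocks_by_chr : List (String × List (Int × Int))) (division : Int) : Prop :=
  division = 0 → blocks_by_chr.all (fun p => p.2.isEmpty) = true
instance (blocks_by_chr : List (String × List (Int × Int))) (division : Int) : Decidable (Pre_build_speed_index blocks_by_chr division) := by unfold Pre_build_speed_index; infer_instance

def pvWitness_build_speed_index : (List (String × List (Int × Int))) × Int :=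
  ([("chr1", [(1, 2), (3, 4), (5, 9)])], 2)

def Spec_build_speed_index (blocks_by_chr : List (String × List (Int × Int))) (division : Int) (out : List (String × List (Int × Int × Int))) : Prop := out = build_speed_index_alt blocks_by_chr division
instance (blocks_by_chr : List (String × List (Int × Int))) (division : Int) (out : List (String × List (Int × Int × Int))) : Decidable (Spec_build_speed_index blocks_by_chr division out) := by unfold Spec_build_speed_index; infer_instance

-- ===== CLAIM (what is proved, stated in full; the proofs are below) =====
def Claim_equal_build_speed_index : Prop := ∀ (blocks_by_chr : List (String × List (Int × Int))) (division : Int), Dom_build_speed_index blocks_by_chr division → Pre_build_speed_index blocks_by_chr division → Spec_build_speed_index blocks_by_chr division (build_speed_index blocks_by_chr division)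

-- ===== LEMMAS AND PROOFS =====

-- A's loop invariant: after the first j iterations, start equals the closed form
-- j*base + min j rem, and the list so far is B's first j closed-form bins.
theorem pvLoopInv (blocks : List (Int × Int)) (n base rem t : Int)
    (hb : 1 ≤ base) (hr0 : 0 ≤ rem) (hrt : rem < t) (hsum : base * t + rem = n) :
    ∀ j : Nat, (j : Int) ≤ t →
      (PySem.List.pyRange 0 j 1).foldl
        (fun (st : List (Int × Int × Int) × Int) i =>
          let size := base + (if i < rem then 1 else 0)
          let e := st.2 + size
          let start := if st.2 ≥ n then n - 1 else st.2
          let first_start := (PySem.List.pyGetD blocks start (0, 0)).1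
          (st.1 ++ [(first_start, start, e)], e)) ([], 0)
      = ((PySem.List.pyRange 0 j 1).map (fun i =>
            ((PySem.List.pyGetD blocks (i * base + min i rem) (0, 0)).1,
             i * base + min i rem,
             (i + 1) * base + min (i + 1) rem)),
         (j : Int) * base + min (j : Int) rem) := by
  intro j
  induction j with
  | zero =>
      intro _
      rw [show ((0 : Nat) : Int) = 0 from rfl, PySem.List.pyRange_one_eq_nil le_rfl]
      refine Prod.ext rfl ?_
      simp only [List.foldl_nil, zero_mul, zero_add]
      omega
  | succ j ih =>
      intro hj
      have hjt : (j : Int) < t := by push_cast at hj; omega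
      have hcast : ((j + 1 : Nat) : Int) = (j : Int) + 1 := by push_cast; ring
      rw [hcast, PySem.List.pyRange_one_succ_right (by positivity), List.foldl_append,
        List.map_append, ih (by omega)]
      -- the guard is a no-op: current start < n
      have hmul : (j : Int) * base ≤ (t - 1) * base :=
        mul_le_mul_of_nonneg_right (by omega) (by omega)
      have hlt : (j : Int) * base + min (j : Int) rem < n := by
        have : min (j : Int) rem ≤ rem := min_le_right _ _
        nlinarith
      simp only [List.foldl_cons, List.foldl_nil, List.map_cons, List.map_nil]
      have hguard : ¬ ((j : Int) * base + min (j : Int) rem ≥ n) := by omega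
      simp only [hguard, if_false]
      have hstep : min ((j : Int) + 1) rem = min (j : Int) rem + (if (j : Int) < rem then 1 else 0) := by
        split_ifs <;> omega
      have he : ((j : Int) + 1) * base + min ((j : Int) + 1) rem
          = (j : Int) * base + min (j : Int) rem + (base + (if (j : Int) < rem then 1 else 0)) := by
        rw [hstep]; ring
      rw [he]

-- per-chromosome equality, for every division (when bins ≤ 0 both loops are empty)
theorem pvIndexList_eq (blocks : List (Int × Int)) (division : Int) :
    pvIndexListA blocks division = pvIndexListB blocks division := by
  unfold pvIndexListA pvIndexListB
  by_cases h0 : (blocks.length : Int) = 0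
  · simp [h0]
  · simp only [h0, if_false]
    set n : Int := (blocks.length : Int) with hn
    have hn1 : 1 ≤ n := by omega
    set t := min division n with ht
    by_cases hpos : 1 ≤ t
    · have htn : t ≤ n := by rw [ht]; exact min_le_right _ _
      set base := PySem.Int.floordiv n t with hbase
      set rem := PySem.Int.mod n t with hrem
      have hb : 1 ≤ base := by
        rw [hbase, PySem.Int.le_floordiv_iff_mul_le (by omega)]
        linarith
      have hr0 : 0 ≤ rem := by
        rw [hrem, PySem.Int.mod_eq_emod_of_pos (by omega)]
        exact Int.emod_nonneg n (by omega)
      have hrt : rem < t := by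
        rw [hrem, PySem.Int.mod_eq_emod_of_pos (by omega)]
        exact Int.emod_lt_of_pos n (by omega)
      have hsum : base * t + rem = n := by
        rw [hbase, hrem]
        exact PySem.Int.floordiv_mul_add_mod n t
      have hinv := pvLoopInv blocks n base rem t hb hr0 hrt hsum t.toNat (by omega)
      have hcast : ((t.toNat : Nat) : Int) = t := by omega
      rw [hcast] at hinv
      rw [hinv]
      -- the fix-up never fires: last end = t*base + min t rem = n
      have hsplit : PySem.List.pyRange 0 t 1 = PySem.List.pyRange 0 (t - 1) 1 ++ [t - 1] := by
        have := PySem.List.pyRange_one_succ_right (a := 0) (b := t - 1) (by omega)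
        simpa using this
      rw [hsplit, List.map_append]
      simp only [List.map_cons, List.map_nil, List.getLast?_concat]
      have h4 : t * base + min t rem = n := by
        have hmin : min t rem = rem := by omega
        rw [hmin, mul_comm]
        exact hsum
      simp
      intro hne
      exact absurd h4 hne
    · -- bins ≤ 0: range(bins) is empty, both lists are []
      have : PySem.List.pyRange 0 t 1 = [] := PySem.List.pyRange_one_eq_nil (by omega)
      simp [this]

-- ===== VERDICT (by name: the statement is the Claim_ definition above) =====
theorem build_speed_index_spec : Claim_equal_build_speed_index := by
  intro blocks_by_chr division _ _
  unfold Spec_build_speed_index build_speed_index build_speed_index_alt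
  simp only [pvIndexList_eq]
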